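-- pv_equiv track=rewrite | github.com/tsinghua-fib-lab/DisasterMobLLM | codes/utils.py | get_pred_label
-- ===== SOURCE A (Python) =====
-- def find_and_trim(s, substrings):
--     # 初始化最小索引为无穷大
--     min_index = float("inf")
--     chosen_substring = None
--
--     # 遍历列表中的每个子字符串
--     for substring in substrings:
--         index = s.find(substring)
--         if index != -1 and index < min_index:
--             min_index = index
--             chosen_substring = substring
--
--     # 如果没有找到任何一个子字符串，返回原字符串
--     if min_index == float("inf"):
--         return s, chosen_substring
--     s = s[min_index + 3 :]
--     # 返回从找到的位置开始的子串
--     return s, chosen_substring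
--
-- def get_pred_label(row):
--     row = row.lower()
--     row, label1 = find_and_trim(row, ["yes", "no"])
--     if not label1 == None:
--         row, label2 = find_and_trim(row, ["yes", "no"])
--         if not label2 == None:
--             row, label3 = find_and_trim(
--                 row, ["yes", "no"] + [str(x) for x in list(range(16))]
--             )
--             if not label3 == None:
--                 return [label1, label2, label3]
--     return None
-- ===== SOURCE B (Python) =====
-- # Same three-stage yes/no/digit label parse, but each stage is a single left-to-right
-- # position scan with ordered startswith checks instead of one s.find per candidate
-- # plus minimum-index bookkeeping.
--
-- _YN = ["yes", "no"]
-- _STAGE3 = _YN + [str(x) for x in range(16)]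
--
-- def _earliest(s, tokens):
--     # first position where any token matches; at that position, first token in list order
--     for i in range(len(s)):
--         for t in tokens:
--             if s.startswith(t, i):
--                 return t, s[i + 3:]
--     return None
--
-- def get_pred_label(row):
--     s = row.lower()
--     labels = []
--     for tokens in (_YN, _YN, _STAGE3):
--         m = _earliest(s, tokens)
--         if m is None:
--             return None
--         label, s = m
--         labels.append(label)
--     return labels
-- ===== Notes on version B (the rewrite author's own statement) =====
-- stated objective: alternative
-- what changed: Each stage's helper is replaced: instead of calling s.find once per candidate token and tracking the minimum index with tie-break bookkeeping, B does a single left-to-right scan over positions, checking the ordered token list with startswith at each position and returning at the first hit; the three stages become a uniform loop over an accumulator.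
import Mathlib
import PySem

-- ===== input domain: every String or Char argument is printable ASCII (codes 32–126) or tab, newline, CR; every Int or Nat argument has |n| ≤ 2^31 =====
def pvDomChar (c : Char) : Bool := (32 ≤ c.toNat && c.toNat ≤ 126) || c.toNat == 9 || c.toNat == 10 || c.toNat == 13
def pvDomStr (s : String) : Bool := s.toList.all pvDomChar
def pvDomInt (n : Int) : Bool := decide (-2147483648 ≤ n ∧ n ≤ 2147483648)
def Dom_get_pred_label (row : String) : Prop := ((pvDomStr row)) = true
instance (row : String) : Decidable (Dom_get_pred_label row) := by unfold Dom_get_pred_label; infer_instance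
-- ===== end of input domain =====

-- B replaces the per-token s.find + minimum-index bookkeeping of A's helper by a single
-- left-to-right position scan with ordered startswith checks; same return value everywhere.

-- ===== PORT A =====
-- the loop body of find_and_trim: min_index is Option Int (none = float("inf")), chosen is Option
def pvStep (s : List Char) (st : Option Int × Option (List Char)) (sub : List Char) :
    Option Int × Option (List Char) :=
  let index := PySem.Chars.find s sub
  if (!(index == -1) && (match st.1 with | none => true | some m => decide (index < m)))
  then (some index, some sub) else st

def pvFindAndTrim (s : List Char) (subs : List (List Char)) : List Char × Option (List Char) :=
  let st := subs.foldl (pvStep s) (none, none)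
  match st.1 with
  | none => (s, st.2)
  | some m => (PySem.Chars.slice s (some (m + 3)) none, st.2)

def get_pred_label (row : String) : Option (List String) :=
  let r0 := PySem.Chars.lower row.toList
  let p1 := pvFindAndTrim r0 [['y','e','s'], ['n','o']]
  match p1.2 with
  | none => none
  | some label1 =>
    let p2 := pvFindAndTrim p1.1 [['y','e','s'], ['n','o']]
    match p2.2 with
    | none => none
    | some label2 =>
      let p3 := pvFindAndTrim p2.1
        ([['y','e','s'], ['n','o']] ++ (PySem.List.pyRange 0 16 1).map PySem.Int.toChars)
      match p3.2 with
      | none => none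
      | some label3 => some [String.ofList label1, String.ofList label2, String.ofList label3]

-- ===== PORT B =====
def pvYN : List (List Char) := [['y','e','s'], ['n','o']]
def pvStage3 : List (List Char) := pvYN ++ (PySem.List.pyRange 0 16 1).map PySem.Int.toChars

-- _earliest: the scan over positions i becomes structural recursion over the suffix s[i:]
def pvEarliest (tokens : List (List Char)) : List Char → Option (List Char × List Char)
  | [] => none
  | c :: rest =>
    match tokens.find? (fun t => PySem.Chars.startswith (c :: rest) t) with
    | some t => some (t, (c :: rest).drop 3)
    | none => pvEarliest tokens rest

def get_pred_label_alt (row : String) : Option (List String) :=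
  let res := [pvYN, pvYN, pvStage3].foldl
    (fun (acc : Option (List (List Char) × List Char)) tokens =>
      match acc with
      | none => none
      | some (labels, s) =>
        match pvEarliest tokens s with
        | none => none
        | some (label, s') => some (labels ++ [label], s'))
    (some ([], PySem.Chars.lower row.toList))
  res.map (fun p => p.1.map String.ofList)

-- ===== PRECONDITION & SPEC =====
def Spec_get_pred_label (row : String) (out : Option (List String)) : Prop := out = get_pred_label_alt row
instance (row : String) (out : Option (List String)) : Decidable (Spec_get_pred_label row out) := by unfold Spec_get_pred_label; infer_instance

-- ===== CLAIM (what is proved, stated in full; the proofs are below) =====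
def Claim_equal_get_pred_label : Prop := ∀ (row : String), Dom_get_pred_label row → Spec_get_pred_label row (get_pred_label row)

-- ===== LEMMAS AND PROOFS =====

-- find points at k when sub matches at k and nowhere earlier
lemma pv_find_first (s sub : List Char) (k : Nat) (hk : sub <+: s.drop k)
    (hmin : ∀ i < k, ¬ sub <+: s.drop i) : PySem.Chars.find s sub = (k : Int) := by
  have hinf : sub <:+: s := by
    rw [← PySem.Chars.isIn_iff_infix, ← PySem.Chars.exists_prefix_drop_iff_isIn]
    exact ⟨k, hk⟩
  have h0 : 0 ≤ PySem.Chars.find s sub := (PySem.Chars.find_nonneg_iff s sub).mpr hinf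
  obtain ⟨h1, h2⟩ := PySem.Chars.find_spec h0
  have hkk : (PySem.Chars.find s sub).toNat = k := by
    rcases Nat.lt_trichotomy (PySem.Chars.find s sub).toNat k with h | h | h
    · exact absurd h1 (hmin _ h)
    · exact h
    · exact absurd hk (h2 k h)
  omega

-- cons step for find when sub is not a prefix
lemma pv_find_cons (c : Char) (rest sub : List Char) (h : ¬ sub <+: c :: rest) :
    PySem.Chars.find (c :: rest) sub =
      if PySem.Chars.find rest sub = -1 then -1 else PySem.Chars.find rest sub + 1 := by
  split_ifs with hm
  · rw [PySem.Chars.find_eq_neg_one_iff] at hm ⊢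
    rw [List.infix_cons_iff]
    rintro (h' | h')
    · exact h h'
    · exact hm h'
  · have h0 : 0 ≤ PySem.Chars.find rest sub := by
      have := PySem.Chars.neg_one_le_find rest sub
      omega
    obtain ⟨h1, h2⟩ := PySem.Chars.find_spec h0
    have := pv_find_first (c :: rest) sub ((PySem.Chars.find rest sub).toNat + 1)
      (by simpa using h1)
      (by
        intro i hi
        match i with
        | 0 => simpa using h
        | (j+1) => exact fun hj => h2 j (by omega) (by simpa using hj))
    omega

lemma pv_startswith_iff_find_zero (s u : List Char) :
    PySem.Chars.startswith s u = true ↔ PySem.Chars.find s u = 0 := by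
  constructor
  · intro h
    have := pv_find_first s u 0 (by simpa using (PySem.Chars.startswith_iff s u).mp h)
      (by omega)
    simpa using this
  · intro h
    obtain ⟨h1, _⟩ := PySem.Chars.find_spec (s := s) (sub := u) (by omega)
    rw [PySem.Chars.startswith_iff]
    simpa [h] using h1

lemma pv_fold_const (s : List Char) (subs : List (List Char)) (st : Option Int × Option (List Char))
    (h : ∀ u ∈ subs, PySem.Chars.find s u = -1) :
    subs.foldl (pvStep s) st = st := by
  induction subs generalizing st with
  | nil => rfl
  | cons u rest ih =>
    have hu := h u (by simp)
    simp only [List.foldl_cons, pvStep, hu]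
    simpa using ih st (fun v hv => h v (by simp [hv]))

lemma pv_fold_absorb_zero (s : List Char) (subs : List (List Char)) (ch : Option (List Char)) :
    subs.foldl (pvStep s) (some 0, ch) = (some 0, ch) := by
  induction subs with
  | nil => rfl
  | cons u rest ih =>
    have := PySem.Chars.neg_one_le_find s u
    simp only [List.foldl_cons, pvStep]
    have hcond : (!(PySem.Chars.find s u == -1) &&
        (match (some (0:Int), ch).1 with | none => true | some m => decide (PySem.Chars.find s u < m))) = false := by
      simp only []
      by_cases h1 : PySem.Chars.find s u = -1 <;> simp [h1] <;> omega
    rw [hcond]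
    simpa using ih

lemma pv_fold_zero (s : List Char) (subs : List (List Char)) (t : List Char)
    (h : subs.find? (fun u => PySem.Chars.startswith s u) = some t) :
    ∀ st : Option Int × Option (List Char), (∀ m ∈ st.1, 1 ≤ m) →
      subs.foldl (pvStep s) st = (some 0, some t) := by
  induction subs with
  | nil => simp at h
  | cons u rest ih =>
    rintro ⟨mo, ch⟩ hst
    by_cases hu : PySem.Chars.startswith s u = true
    · rw [List.find?_cons_of_pos hu] at h
      injection h with h; subst h
      have hf : PySem.Chars.find s u = 0 := (pv_startswith_iff_find_zero s u).mp hu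
      have hstep : pvStep s (mo, ch) u = (some 0, some u) := by
        rcases mo with _ | m
        · simp [pvStep, hf]
        · have hm := hst m (by simp)
          have : (0 : Int) < m := by omega
          simp [pvStep, hf, this]
      rw [List.foldl_cons, hstep]
      exact pv_fold_absorb_zero s rest (some u)
    · rw [List.find?_cons_of_neg hu] at h
      have hfz : PySem.Chars.find s u ≠ 0 := by
        intro h0; exact hu ((pv_startswith_iff_find_zero s u).mpr h0)
      have hge := PySem.Chars.neg_one_le_find s u
      rw [List.foldl_cons]
      apply ih h
      simp only [pvStep]
      split_ifs with hcond
      · intro m hm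
        simp only [Option.mem_def, Option.some.injEq] at hm
        rw [Bool.and_eq_true] at hcond
        have : ¬ PySem.Chars.find s u = -1 := by simpa using hcond.1
        omega
      · exact hst

def pvShift (st : Option Int × Option (List Char)) : Option Int × Option (List Char) :=
  (st.1.map (· + 1), st.2)

lemma pv_fold_shift (c : Char) (rest : List Char) (subs : List (List Char))
    (hpre : ∀ u ∈ subs, PySem.Chars.startswith (c :: rest) u = false) :
    ∀ st : Option Int × Option (List Char),
      subs.foldl (pvStep (c :: rest)) (pvShift st) = pvShift (subs.foldl (pvStep rest) st) := by
  induction subs with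
  | nil => intro st; rfl
  | cons u tail ih =>
    intro st
    have hu : ¬ u <+: c :: rest := by
      have := hpre u (by simp)
      intro h'
      rw [← PySem.Chars.startswith_iff] at h'
      simp [this] at h'
    have hcons := pv_find_cons c rest u hu
    have hge := PySem.Chars.neg_one_le_find rest u
    have htail : ∀ v ∈ tail, PySem.Chars.startswith (c :: rest) v = false :=
      fun v hv => hpre v (by simp [hv])
    simp only [List.foldl_cons]
    rw [← ih htail]
    congr 1
    by_cases hm : PySem.Chars.find rest u = -1
    · simp [pvStep, hcons, hm, pvShift]
    · rcases hst : st.1 with _ | m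
      · simp only [pvStep, hcons, hm, pvShift, hst]
        split_ifs with h1 h2 h2 <;> simp_all <;> omega
      · simp only [pvStep, hcons, hm, pvShift, hst]
        split_ifs with h1 h2 h2 <;> simp_all <;> omega

-- main invariant: A's fold against B's scan
lemma pv_earliest_fold (subs : List (List Char)) (hne : ∀ u ∈ subs, u ≠ []) (s : List Char) :
    match pvEarliest subs s with
    | none => subs.foldl (pvStep s) (none, none) = (none, none)
    | some (t, r) => ∃ k : Nat,
        subs.foldl (pvStep s) (none, none) = (some (k : Int), some t) ∧ r = s.drop (k + 3) := by
  induction s with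
  | nil =>
    simp only [pvEarliest]
    apply pv_fold_const
    intro u hu
    rw [PySem.Chars.find_eq_neg_one_iff]
    intro hinf
    exact hne u hu (List.eq_nil_of_infix_nil hinf)
  | cons c rest ih =>
    rcases hfind : subs.find? (fun t => PySem.Chars.startswith (c :: rest) t) with _ | t
    · have hpre : ∀ u ∈ subs, PySem.Chars.startswith (c :: rest) u = false := by
        intro u hu
        have := List.find?_eq_none.mp hfind u hu
        simpa using this
      have hshift := pv_fold_shift c rest subs hpre (none, none)
      simp only [pvEarliest, hfind]
      simp only [pvShift, Option.map_none] at hshift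
      rcases hE : pvEarliest subs rest with _ | ⟨t, r⟩
      · rw [hE] at ih
        rw [ih] at hshift
        simpa [pvShift] using hshift
      · rw [hE] at ih
        obtain ⟨k, hfold, hr⟩ := ih
        refine ⟨k + 1, ?_, ?_⟩
        · rw [hfold] at hshift
          simp only [Option.map_some] at hshift
          rw [hshift]
          congr 2
        · rw [hr, List.drop_succ_cons]
    · simp only [pvEarliest, hfind]
      refine ⟨0, ?_, rfl⟩
      exact pv_fold_zero (c :: rest) subs t hfind (none, none) (by simp)

lemma pv_stage (subs : List (List Char)) (hne : ∀ u ∈ subs, u ≠ []) (s : List Char) :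
    pvFindAndTrim s subs =
      match pvEarliest subs s with
      | none => (s, none)
      | some (t, r) => (r, some t) := by
  have h := pv_earliest_fold subs hne s
  rcases hE : pvEarliest subs s with _ | ⟨t, r⟩
  · rw [hE] at h
    simp [pvFindAndTrim, h]
  · rw [hE] at h
    obtain ⟨k, hfold, hr⟩ := h
    simp only [pvFindAndTrim, hfold]
    have h3 : (k : Int) + 3 = ((k + 3 : Nat) : Int) := by push_cast; ring
    rw [h3, PySem.Chars.slice_eq_listSlice, PySem.List.slice_from_natCast, hr]

lemma pv_yn_ne : ∀ u ∈ pvYN, u ≠ [] := by decide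
lemma pv_stage3_ne : ∀ u ∈ pvStage3, u ≠ [] := by decide

-- ===== VERDICT (by name: the statement is the Claim_ definition above) =====
theorem get_pred_label_spec : Claim_equal_get_pred_label := by
  intro row _
  unfold Spec_get_pred_label get_pred_label get_pred_label_alt
  simp only [List.foldl_cons, List.foldl_nil]
  have hS3 : [['y','e','s'], ['n','o']] ++ (PySem.List.pyRange 0 16 1).map PySem.Int.toChars = pvStage3 := rfl
  have hYN : [['y','e','s'], ['n','o']] = pvYN := rfl
  rw [hS3, hYN, pv_stage pvYN pv_yn_ne]
  rcases h1 : pvEarliest pvYN (PySem.Chars.lower row.toList) with _ | ⟨l1, s1⟩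
  · simp
  · simp only []
    rw [pv_stage pvYN pv_yn_ne]
    rcases h2 : pvEarliest pvYN s1 with _ | ⟨l2, s2⟩
    · simp
    · simp only []
      rw [pv_stage pvStage3 pv_stage3_ne]
      rcases h3 : pvEarliest pvStage3 s2 with _ | ⟨l3, s3⟩
      · simp
      · simp
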